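-- pv_equiv track=rewrite | github.com/M3nxudo/AOC2024 | Day11/Aoc11.py | evaluate_stone
-- ===== SOURCE A (Python) =====
-- def evaluate_stone(stone_value):
--     if stone_value == 0:  # 1st condition
--         return [1]
--     # Check if even digits
--     temp = stone_value
--     digit_count = 0
--     while temp > 0:
--         digit_count += 1
--         temp //= 10
--     if digit_count % 2 != 0:  # 3rd condition
--         return [stone_value * 2024]
--     # Split
--     divisor = 10 ** (digit_count // 2)
--     second_half = stone_value % divisor
--     first_half = stone_value // divisor
--     # 2nd condition
--     return [first_half, second_half]
-- ===== SOURCE B (Python) =====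
-- def evaluate_stone(stone_value):
--     if stone_value == 0:
--         return [1]
--     # Materialize the decimal digits little-endian, then rebuild the halves by Horner folds.
--     digits = []
--     n = stone_value
--     while n > 0:
--         digits.append(n % 10)
--         n //= 10
--     if len(digits) % 2 != 0:
--         return [stone_value * 2024]
--     half = len(digits) // 2
--     low = 0
--     for d in reversed(digits[:half]):
--         low = low * 10 + d
--     high = 0
--     for d in reversed(digits[half:]):
--         high = high * 10 + d
--     return [high, low]
-- ===== Notes on version B (the rewrite author's own statement) =====
-- stated objective: alternative
-- what changed: Instead of one pass that counts digits and then a power-of-10 divmod split, B materializes the little-endian decimal digit list once and rebuilds each half with a Horner fold over its slice.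
-- outside the precondition, e.g. on evaluate_stone(-12): A returns [-12, 0], B returns [0, 0]
import Mathlib
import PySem

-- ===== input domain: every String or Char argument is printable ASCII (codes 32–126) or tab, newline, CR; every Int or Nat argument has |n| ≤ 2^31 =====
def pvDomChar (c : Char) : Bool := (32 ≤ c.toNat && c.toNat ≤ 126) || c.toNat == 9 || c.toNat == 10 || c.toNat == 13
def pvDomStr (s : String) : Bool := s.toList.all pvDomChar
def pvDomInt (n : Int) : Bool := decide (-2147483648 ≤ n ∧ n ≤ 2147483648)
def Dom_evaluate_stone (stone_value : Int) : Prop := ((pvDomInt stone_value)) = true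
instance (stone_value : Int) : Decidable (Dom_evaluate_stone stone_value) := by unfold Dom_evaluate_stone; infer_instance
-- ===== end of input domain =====

-- One honest line: B replaces A's digit-count loop + power-of-10 divmod split by an explicit
-- little-endian digit list rebuilt into the two halves by Horner folds (alternative structure, same cost).

-- ===== PORT A =====
-- 'while temp > 0: digit_count += 1; temp //= 10'
def aCountLoop (temp : Int) (digit_count : Nat) : Nat :=
  if temp > 0 then aCountLoop (PySem.Int.floordiv temp 10) (digit_count + 1) else digit_count
termination_by temp.toNat
decreasing_by
  have : PySem.Int.floordiv temp 10 = temp / 10 := PySem.Int.floordiv_eq_ediv_of_pos (by omega)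
  rw [this]; omega

def evaluate_stone (stone_value : Int) : List Int :=
  if stone_value = 0 then [1]
  else
    let digit_count := aCountLoop stone_value 0
    if digit_count % 2 ≠ 0 then [stone_value * 2024]
    else
      let divisor : Int := 10 ^ (digit_count / 2)
      let second_half := PySem.Int.mod stone_value divisor
      let first_half := PySem.Int.floordiv stone_value divisor
      [first_half, second_half]

-- ===== PORT B =====
-- 'while n > 0: digits.append(n % 10); n //= 10'  (little-endian digit list)
def bDigits (n : Int) : List Int :=
  if n > 0 then PySem.Int.mod n 10 :: bDigits (PySem.Int.floordiv n 10) else []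
termination_by n.toNat
decreasing_by
  have : PySem.Int.floordiv n 10 = n / 10 := PySem.Int.floordiv_eq_ediv_of_pos (by omega)
  rw [this]; omega

-- 'for d in reversed(ds): acc = acc * 10 + d'
def bHorner (ds : List Int) : Int :=
  ds.reverse.foldl (fun acc d => acc * 10 + d) 0

def evaluate_stone_alt (stone_value : Int) : List Int :=
  if stone_value = 0 then [1]
  else
    let digits := bDigits stone_value
    if digits.length % 2 ≠ 0 then [stone_value * 2024]
    else
      let half := digits.length / 2
      let low := bHorner (digits.take half)
      let high := bHorner (digits.drop half)
      [high, low]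

-- ===== PRECONDITION & SPEC =====
-- Pre_ restricts to the natural domain of nonnegative stone values: on negatives A's digit-count
-- loop never runs, so A returns the accidental [stone_value, 0] while B returns [0, 0].
def Pre_evaluate_stone (stone_value : Int) : Prop := 0 ≤ stone_value
instance (stone_value : Int) : Decidable (Pre_evaluate_stone stone_value) := by unfold Pre_evaluate_stone; infer_instance
def pvWitness_evaluate_stone : Int := (17)

def Spec_evaluate_stone (stone_value : Int) (out : List Int) : Prop := out = evaluate_stone_alt stone_value
instance (stone_value : Int) (out : List Int) : Decidable (Spec_evaluate_stone stone_value out) := by unfold Spec_evaluate_stone; infer_instance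

-- ===== CLAIM (what is proved, stated in full; the proofs are below) =====
def Claim_equal_evaluate_stone : Prop := ∀ (stone_value : Int), Dom_evaluate_stone stone_value → Pre_evaluate_stone stone_value → Spec_evaluate_stone stone_value (evaluate_stone stone_value)

-- ===== LEMMAS AND PROOFS =====

-- A's counter equals the digit-list length (accumulator shifted out).
theorem aCountLoop_eq (n : Int) (c : Nat) : aCountLoop n c = c + (bDigits n).length := by
  by_cases h : n > 0
  · rw [aCountLoop, bDigits, if_pos h, if_pos h]
    have : PySem.Int.floordiv n 10 = n / 10 := PySem.Int.floordiv_eq_ediv_of_pos (by omega)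
    rw [this] at *
    have ih := aCountLoop_eq (n / 10) (c + 1)
    simp [ih]; omega
  · rw [aCountLoop, bDigits, if_neg h, if_neg h]; simp
termination_by n.toNat
decreasing_by omega

theorem bHorner_cons (x : Int) (t : List Int) : bHorner (x :: t) = bHorner t * 10 + x := by
  simp [bHorner, List.foldl_append]

-- the digits of n / 10^h are the digits of n with h dropped
theorem bDigits_div_pow (n : Int) (hn : 0 ≤ n) (h : Nat) :
    bDigits (n / 10 ^ h) = (bDigits n).drop h := by
  induction h generalizing n with
  | zero => simp
  | succ k ih =>
    by_cases hp : n > 0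
    · have hexp : bDigits n = PySem.Int.mod n 10 :: bDigits (n / 10) := by
        rw [bDigits, if_pos hp, PySem.Int.floordiv_eq_ediv_of_pos (by omega : (0:Int) < 10)]
      rw [hexp, List.drop_succ_cons, ← ih (n / 10) (Int.ediv_nonneg hn (by omega))]
      congr 1
      rw [Int.ediv_ediv_of_nonneg (by omega), ← pow_succ']
    · have h0 : n = 0 := by omega
      subst h0
      rw [bDigits]; simp [bDigits]

-- Horner over all digits reconstructs n
theorem bHorner_bDigits (n : Int) (hn : 0 ≤ n) : bHorner (bDigits n) = n := by
  by_cases hp : n > 0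
  · rw [bDigits, if_pos hp, bHorner_cons]
    have hfd : PySem.Int.floordiv n 10 = n / 10 := PySem.Int.floordiv_eq_ediv_of_pos (by omega)
    have hm : PySem.Int.mod n 10 = n % 10 := PySem.Int.mod_eq_emod_of_pos (by omega)
    rw [hfd, hm, bHorner_bDigits (n / 10) (Int.ediv_nonneg hn (by omega))]
    omega
  · have h0 : n = 0 := by omega
    subst h0
    rw [bDigits]; simp [bHorner]
termination_by n.toNat
decreasing_by omega

-- Horner over the first h digits is n mod 10^h
theorem bHorner_take (n : Int) (hn : 0 ≤ n) (h : Nat) :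
    bHorner ((bDigits n).take h) = n % 10 ^ h := by
  induction h generalizing n with
  | zero => simp [bHorner]
  | succ k ih =>
    by_cases hp : n > 0
    · rw [bDigits, if_pos hp]
      have hfd : PySem.Int.floordiv n 10 = n / 10 := PySem.Int.floordiv_eq_ediv_of_pos (by omega)
      have hm : PySem.Int.mod n 10 = n % 10 := PySem.Int.mod_eq_emod_of_pos (by omega)
      rw [hfd, hm, List.take_succ_cons, bHorner_cons,
          ih (n / 10) (Int.ediv_nonneg hn (by omega))]
      -- (n/10 % 10^k) * 10 + n % 10 = n % 10^(k+1)
      have h1 : n % 10 ^ (k + 1) = 10 * ((n / 10) % 10 ^ k) + n % 10 := by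
        have e2 : n / (10 * 10 ^ k) = n / 10 / 10 ^ k :=
          (Int.ediv_ediv_of_nonneg (x := n) (by omega)).symm
        rw [pow_succ, mul_comm (10 ^ k) 10]
        simp only [Int.emod_def]
        rw [e2]
        ring
      omega
    · have h0 : n = 0 := by omega
      subst h0
      rw [bDigits]; simp [bHorner]

-- ===== VERDICT (by name: the statement is the Claim_ definition above) =====
theorem evaluate_stone_spec : Claim_equal_evaluate_stone := by
  intro n _ hpre
  unfold Spec_evaluate_stone evaluate_stone evaluate_stone_alt
  by_cases h0 : n = 0
  · simp [h0]
  · have hn : 0 ≤ n := hpre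
    rw [if_neg h0, if_neg h0]
    have hc : aCountLoop n 0 = (bDigits n).length := by
      simpa using aCountLoop_eq n 0
    simp only [hc]
    by_cases hodd : (bDigits n).length % 2 ≠ 0
    · rw [if_pos hodd, if_pos hodd]
    · rw [if_neg hodd, if_neg hodd]
      have hpow : (0:Int) < 10 ^ ((bDigits n).length / 2) := by positivity
      have hmod : PySem.Int.mod n (10 ^ ((bDigits n).length / 2)) =
          n % 10 ^ ((bDigits n).length / 2) := PySem.Int.mod_eq_emod_of_pos hpow
      have hdiv : PySem.Int.floordiv n (10 ^ ((bDigits n).length / 2)) =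
          n / 10 ^ ((bDigits n).length / 2) := PySem.Int.floordiv_eq_ediv_of_pos hpow
      rw [hmod, hdiv, ← bHorner_take n hn, ← bDigits_div_pow n hn, bHorner_bDigits _ (Int.ediv_nonneg hn (le_of_lt hpow))]
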